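-- pv_equiv track=rewrite | github.com/CarterCribbs/CS101 | APTs/APT6/MemberCheck.py | whosDishonest
-- ===== SOURCE A (Python) =====
-- def whosDishonest(club1, club2, club3):
--     namelist = []
--     for item in club1:
--         if item in club2 or item in club3:
--             namelist.append(item)
--     for item in club2:
--         if item in club3:
--             namelist.append(item)
--     namelistset = set(namelist)
--     namelistlist = list(namelistset)
--     sortednames = sorted(namelistlist)
--     return sortednames
-- ===== SOURCE B (Python) =====
-- def whosDishonest(club1, club2, club3):
--     counts = {}
--     for club in (club1, club2, club3):
--         for name in set(club):
--             counts[name] = counts.get(name, 0) + 1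
--     return sorted(name for name, c in counts.items() if c >= 2)
-- ===== Notes on version B (the rewrite author's own statement) =====
-- stated objective: faster
-- what changed: Replaces A's asymmetric pairwise list-membership scans (O(n^2)) by one symmetric pass: build the three sets, count per-name distinct club membership in a dict, and return the sorted names with count >= 2.
import Mathlib
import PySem

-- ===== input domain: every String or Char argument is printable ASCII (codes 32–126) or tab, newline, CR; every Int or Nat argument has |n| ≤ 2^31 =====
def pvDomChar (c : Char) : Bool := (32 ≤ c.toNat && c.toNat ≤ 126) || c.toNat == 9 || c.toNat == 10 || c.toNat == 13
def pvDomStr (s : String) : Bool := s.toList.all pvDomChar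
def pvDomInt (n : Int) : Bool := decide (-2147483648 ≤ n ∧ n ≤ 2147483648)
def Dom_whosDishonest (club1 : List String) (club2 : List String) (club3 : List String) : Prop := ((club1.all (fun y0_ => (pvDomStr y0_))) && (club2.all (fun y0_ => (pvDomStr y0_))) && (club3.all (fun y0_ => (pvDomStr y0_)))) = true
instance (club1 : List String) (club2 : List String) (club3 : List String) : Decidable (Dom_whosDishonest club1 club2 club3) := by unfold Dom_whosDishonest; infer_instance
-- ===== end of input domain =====

-- B replaces A's pairwise list-membership scans by a symmetric count-over-three-sets pass (objective: faster).
-- ===== PORT A =====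
def whosDishonest (club1 : List String) (club2 : List String) (club3 : List String) : List String :=
  let namelist1 := club1.foldl (fun acc item => if item ∈ club2 ∨ item ∈ club3 then acc ++ [item] else acc) []
  let namelist := club2.foldl (fun acc item => if item ∈ club3 then acc ++ [item] else acc) namelist1
  let namelistset := PySem.Set.ofList namelist
  PySem.List.sorted namelistset (fun x => x) false

-- ===== PORT B =====
def whosDishonest_alt (club1 : List String) (club2 : List String) (club3 : List String) : List String :=
  let allMembers := PySem.Set.ofList club1 ++ PySem.Set.ofList club2 ++ PySem.Set.ofList club3
  let counts := allMembers.foldl (fun d x => d.insert x (d.getD x (0:Int) + 1)) PySem.Dict.empty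
  PySem.List.sorted ((counts.items.filter (fun p => 2 ≤ p.2)).map (·.1)) (fun x => x) false

-- ===== PRECONDITION & SPEC =====
def Spec_whosDishonest (club1 : List String) (club2 : List String) (club3 : List String) (out : List String) : Prop := out = whosDishonest_alt club1 club2 club3
instance (club1 : List String) (club2 : List String) (club3 : List String) (out : List String) : Decidable (Spec_whosDishonest club1 club2 club3 out) := by unfold Spec_whosDishonest; infer_instance

-- ===== CLAIM (what is proved, stated in full; the proofs are below) =====
def Claim_equal_whosDishonest : Prop := ∀ (club1 : List String) (club2 : List String) (club3 : List String), Dom_whosDishonest club1 club2 club3 → Spec_whosDishonest club1 club2 club3 (whosDishonest club1 club2 club3)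

-- ===== LEMMAS AND PROOFS =====

-- count of x in a Nodup list is its membership indicator
theorem count_nodup_ind (l : List String) (h : l.Nodup) (x : String) :
    l.count x = if x ∈ l then 1 else 0 := by
  split_ifs with hm
  · exact List.count_eq_one_of_mem h hm
  · simp [List.count_eq_zero, hm]

-- ===== VERDICT (by name: the statement is the Claim_ definition above) =====
theorem whosDishonest_spec : Claim_equal_whosDishonest := by
  intro club1 club2 club3 _
  simp only [Spec_whosDishonest, whosDishonest, whosDishonest_alt]
  simp only [PySem.List.foldl_append_ite_eq_filter, List.nil_append]
  rw [PySem.Dict.foldl_insert_getD_add_one_eq_counter, PySem.Dict.items_counter,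
    List.filter_map, List.map_map]
  apply PySem.List.sorted_eq_sorted_of_perm _ _ _ (fun a b h => h)
  have hcomp : ((fun (p : String × Int) => p.1) ∘ fun k =>
      (k, ((PySem.Set.ofList club1 ++ PySem.Set.ofList club2 ++ PySem.Set.ofList club3).count k : Int))) = id := rfl
  rw [hcomp, List.map_id]
  rw [List.perm_ext_iff_of_nodup (PySem.Set.nodup_ofList _) (List.Nodup.filter _ (PySem.Set.nodup_ofList _))]
  intro x
  simp only [PySem.Set.mem_ofList, List.mem_filter, List.mem_append, List.count_append,
    Function.comp_apply, decide_eq_true_eq]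
  rw [count_nodup_ind _ (PySem.Set.nodup_ofList club1), count_nodup_ind _ (PySem.Set.nodup_ofList club2),
      count_nodup_ind _ (PySem.Set.nodup_ofList club3)]
  simp only [PySem.Set.mem_ofList]
  by_cases h1 : x ∈ club1 <;> by_cases h2 : x ∈ club2 <;> by_cases h3 : x ∈ club3 <;>
    simp [h1, h2, h3]
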